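-- pv_equiv track=rewrite | github.com/Kyostenas/prettyTables | prettyTables/adjust.py | wrapSingleRow
-- ===== SOURCE A (Python) =====
-- def wrapSingleRow(row):
--     '''
--     Creates a multiline array, being the number lines the number of
--     new lines in the cell that contains the most.
--     '''
--
--     rows = [row]
--     linesAdded = 0
--
--     currentCol = 0
--     for cell in row:
--         parts = cell.splitlines()
--
--         if len(parts)-1 > linesAdded:
--             for x in range((len(parts)-1) - linesAdded):
--                 linesAdded += 1
--                 rows.append(['' for cell in row])
--
--         if len(parts) > 1:
--             for line in range(len(parts)):
--                 rows[line][currentCol] = parts[line]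
--
--         currentCol += 1
--
--     return rows
-- ===== SOURCE B (Python) =====
-- def wrapSingleRow(row):
--     # measure-then-build: split every cell once, take the tallest cell's
--     # height, then construct each output line directly by comprehension.
--     splits = [cell.splitlines() for cell in row]
--     height = max(1, max((len(p) for p in splits), default=0))
--     return [[p[i] if i < len(p) else '' for p in splits] for i in range(height)]
-- ===== Notes on version B (the rewrite author's own statement) =====
-- stated objective: alternative
-- what changed: Replaces A's single grow-as-you-go pass (append blank rows when a taller cell appears, write parts back by index into the growing grid, mutating the input row) with a two-pass measure-then-build: split every cell once, take the maximum height, and build every output line uniformly by comprehension; B does not mutate the input row.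
-- intended difference: On rows containing a single-line cell with a trailing line terminator (e.g. 'a\n' or '\n'), A leaves the raw cell, terminator included, in the first output row because it only rewrites cells that split into 2+ lines; B writes the cell's split line ('a', resp. ''), which is the intended normalized content of a line-expanded table row. — e.g. on wrapSingleRow(["a\n"]): A returns [["a\n"]], B returns [["a"]]
import Mathlib
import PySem

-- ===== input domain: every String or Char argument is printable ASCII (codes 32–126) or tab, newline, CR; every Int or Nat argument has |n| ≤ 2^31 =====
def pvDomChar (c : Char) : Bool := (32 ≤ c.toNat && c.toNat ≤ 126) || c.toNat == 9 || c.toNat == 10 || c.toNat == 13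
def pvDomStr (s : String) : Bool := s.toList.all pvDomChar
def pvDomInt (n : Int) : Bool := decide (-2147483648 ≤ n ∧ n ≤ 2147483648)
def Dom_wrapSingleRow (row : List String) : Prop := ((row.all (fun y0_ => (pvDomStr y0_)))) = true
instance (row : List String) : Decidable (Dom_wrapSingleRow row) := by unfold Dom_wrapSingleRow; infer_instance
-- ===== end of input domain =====

-- B builds the expanded rows by a measure-then-build two-pass construction instead of
-- A's incremental grow-as-you-go pass; equivalence is about the RETURN VALUE only
-- (A mutates its argument in place, B does not), and B intentionally normalizes
-- single-line cells carrying a trailing line terminator (see D_ below).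

-- ===== PORT A =====
-- body of A's inner grow loop ("rows.append(['' for cell in row]); linesAdded += 1")
def pvGrowStep (blank : List String) (p : List (List String) × Nat) (_ : Nat) :
    List (List String) × Nat :=
  (p.1 ++ [blank], p.2 + 1)

-- body of A's inner fill loop ("rows[line][currentCol] = parts[line]")
def pvFillStep (col : Nat) (parts : List String) (rs : List (List String)) (line : Nat) :
    List (List String) :=
  rs.set line ((rs.getD line []).set col (parts.getD line ""))

-- body of A's main "for cell in row" loop; state = (rows, linesAdded, currentCol)
def pvStepA (row : List String) (st : List (List String) × Nat × Nat) (cell : String) :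
    List (List String) × Nat × Nat :=
  let parts := PySem.Str.splitlines cell
  let grown :=
    if parts.length - 1 > st.2.1 then
      (List.range (parts.length - 1 - st.2.1)).foldl
        (pvGrowStep (row.map (fun _ => ""))) (st.1, st.2.1)
    else (st.1, st.2.1)
  let rows2 :=
    if parts.length > 1 then
      (List.range parts.length).foldl (pvFillStep st.2.2 parts) grown.1
    else grown.1
  (rows2, grown.2, st.2.2 + 1)

def wrapSingleRow (row : List String) : List (List String) :=
  (row.foldl (pvStepA row) ([row], 0, 0)).1

-- ===== PORT B =====
def wrapSingleRow_alt (row : List String) : List (List String) :=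
  let splits := row.map PySem.Str.splitlines
  let height := max 1 ((splits.map List.length).foldl max 0)
  (List.range height).map (fun i =>
    splits.map (fun p => if i < p.length then p.getD i "" else ""))

-- ===== PRECONDITION & SPEC =====
-- On rows containing a single-line cell with a trailing line terminator (e.g. "a\n"),
-- A leaves the raw cell, terminator included, in the first output row (it only rewrites
-- cells splitting into 2+ lines); B writes the cell's split line ("a"), the intended
-- normalized content of a line-expanded row.
def D_wrapSingleRow (row : List String) : Prop :=
  ∃ c ∈ row, (PySem.Str.splitlines c).length ≤ 1 ∧ (PySem.Str.splitlines c).getD 0 "" ≠ c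
instance (row : List String) : Decidable (D_wrapSingleRow row) := by
  unfold D_wrapSingleRow; infer_instance
def Spec_wrapSingleRow (row : List String) (out : List (List String)) : Prop :=
  ¬ D_wrapSingleRow row → out = wrapSingleRow_alt row
instance (row : List String) (out : List (List String)) : Decidable (Spec_wrapSingleRow row out) := by
  unfold Spec_wrapSingleRow; infer_instance

def pvDiffWitness_wrapSingleRow : List String := ["a\n"]
def pvDiffWitnessOut_wrapSingleRow : (List (List String)) × (List (List String)) :=
  ([["a\n"]], [["a"]])

-- ===== CLAIM (what is proved, stated in full; the proofs are below) =====
def Claim_unchanged_wrapSingleRow : Prop :=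
  ∀ (row : List String), Dom_wrapSingleRow row → Spec_wrapSingleRow row (wrapSingleRow row)
def Claim_changed_wrapSingleRow : Prop :=
  Dom_wrapSingleRow (pvDiffWitness_wrapSingleRow) ∧
  D_wrapSingleRow (pvDiffWitness_wrapSingleRow) ∧
  wrapSingleRow (pvDiffWitness_wrapSingleRow) = pvDiffWitnessOut_wrapSingleRow.1 ∧
  wrapSingleRow_alt (pvDiffWitness_wrapSingleRow) = pvDiffWitnessOut_wrapSingleRow.2 ∧
  pvDiffWitnessOut_wrapSingleRow.1 ≠ pvDiffWitnessOut_wrapSingleRow.2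
def Claim_exact_wrapSingleRow : Prop :=
  ∀ (row : List String), Dom_wrapSingleRow row → D_wrapSingleRow row →
    wrapSingleRow row ≠ wrapSingleRow_alt row

-- ===== LEMMAS AND PROOFS =====
def pvSl (c : String) : List String := PySem.Str.splitlines c
def pvF (c : String) : String := if (pvSl c).length > 1 then (pvSl c).getD 0 "" else c
def pvG (line : Nat) (c : String) : String :=
  if line < (pvSl c).length then (pvSl c).getD line "" else ""
def pvM (pre : List String) : Nat := pre.foldl (fun a c => max a (pvSl c).length) 1

def pvRowAt (pre suf : List String) (line : Nat) : List String :=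
  if line = 0 then pre.map pvF ++ suf else pre.map (pvG line) ++ suf.map (fun _ => "")

def pvInv (pre suf : List String) : List (List String) :=
  (List.range (pvM pre)).map (pvRowAt pre suf)

lemma pvFoldMax_le_init (l : List String) : ∀ a : Nat,
    a ≤ l.foldl (fun x c => max x (pvSl c).length) a := by
  induction l with
  | nil => intro a; simp
  | cons c t ih =>
      intro a
      exact le_trans (le_max_left _ _) (ih (max a (pvSl c).length))

lemma pvM_ge_one (pre : List String) : 1 ≤ pvM pre := pvFoldMax_le_init pre 1

lemma pvM_concat (pre : List String) (c : String) :
    pvM (pre ++ [c]) = max (pvM pre) (pvSl c).length := by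
  simp [pvM, List.foldl_append]

lemma pvFoldMax_mem_le (l : List String) : ∀ (a : Nat) (c : String), c ∈ l →
    (pvSl c).length ≤ l.foldl (fun x d => max x (pvSl d).length) a := by
  induction l with
  | nil => intro a c h; cases h
  | cons d t ih =>
      intro a c h
      rcases List.mem_cons.1 h with h | h
      · subst h
        exact le_trans (le_max_right _ _) (pvFoldMax_le_init t _)
      · exact ih _ _ h

lemma pvM_mem_le {c : String} {pre : List String} (h : c ∈ pre) :
    (pvSl c).length ≤ pvM pre := pvFoldMax_mem_le pre 1 c h

lemma pvFoldMax_max (l : List String) : ∀ a b : Nat,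
    l.foldl (fun x c => max x (pvSl c).length) (max a b)
      = max a (l.foldl (fun x c => max x (pvSl c).length) b) := by
  induction l with
  | nil => intro a b; rfl
  | cons c t ih =>
      intro a b
      simpa [max_assoc] using ih a (max b (pvSl c).length)

lemma pvGrow (k : Nat) (b : List String) : ∀ (rows : List (List String)) (la : Nat),
    (List.range k).foldl (pvGrowStep b) (rows, la) = (rows ++ List.replicate k b, la + k) := by
  induction k with
  | zero => intro rows la; simp
  | succ n ih =>
      intro rows la
      rw [List.range_succ, List.foldl_append, ih]
      simp [pvGrowStep, List.replicate_succ']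
      omega

lemma pvFill (parts : List String) (col : Nat) (n : Nat) (rows : List (List String)) :
    (List.range n).foldl (pvFillStep col parts) rows
      = rows.mapIdx (fun i r => if i < n then r.set col (parts.getD i "") else r) := by
  induction n with
  | zero =>
      apply List.ext_getElem <;> simp
  | succ n ih =>
      rw [List.range_succ, List.foldl_append, ih, List.foldl_cons, List.foldl_nil]
      unfold pvFillStep
      apply List.ext_getElem
      · simp
      · intro j hj hj'
        have hjr : j < rows.length := by simpa using hj'
        simp only [List.getElem_set, List.getElem_mapIdx]
        by_cases hnj : n = j
        · subst hnj
          have : (List.mapIdx (fun i r => if i < n then r.set col (parts.getD i "") else r) rows).getD n []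
              = rows[n] := by
            rw [List.getD_eq_getElem _ _ (by simpa using hjr)]
            simp
          simp [hjr]
        · have hiff : (j < n) ↔ (j < n + 1) := by omega
          by_cases hlt : j < n
          · simp [hnj, hlt, hiff.mp hlt]
          · simp [hnj, fun h => hlt (by omega : j < n)]
            intro h; omega

lemma pvSet_append (l1 l2 : List String) (a : String) :
    (l1 ++ l2).set l1.length a = l1 ++ l2.set 0 a := by
  induction l1 with
  | nil => simp
  | cons x t ih => simp [ih]

lemma pvSl_def : pvSl = PySem.Str.splitlines := rfl

lemma pvRowAt_zero (pre suf : List String) : pvRowAt pre suf 0 = pre.map pvF ++ suf := by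
  simp [pvRowAt]

lemma pvRowAt_pos (pre suf : List String) {i : Nat} (hi : i ≠ 0) :
    pvRowAt pre suf i = pre.map (pvG i) ++ suf.map (fun _ => "") := by
  simp [pvRowAt, hi]

lemma pvMapG_of_ge {pre : List String} {i : Nat} (hi : pvM pre ≤ i) :
    pre.map (pvG i) = pre.map (fun _ => "") := by
  apply List.map_congr_left
  intro c hc
  have := pvM_mem_le hc
  simp only [pvG]
  rw [if_neg (by omega)]

lemma pvStep_inv (row pre suf' : List String) (cell : String)
    (h : row = pre ++ cell :: suf') :
    pvStepA row (pvInv pre (cell :: suf'), pvM pre - 1, pre.length) cell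
      = (pvInv (pre ++ [cell]) suf', pvM (pre ++ [cell]) - 1, pre.length + 1) := by
  have hm1 : 1 ≤ pvM pre := pvM_ge_one pre
  have hmc : pvM (pre ++ [cell]) = max (pvM pre) (pvSl cell).length := pvM_concat pre cell
  simp only [pvStepA, ← pvSl_def]
  set P := pvSl cell with hP
  set L := P.length with hL
  set m := pvM pre with hm
  set blank : List String := row.map (fun _ => "") with hblank
  have hgrown :
      (if L - 1 > m - 1 then
        (List.range (L - 1 - (m - 1))).foldl (pvGrowStep blank) (pvInv pre (cell :: suf'), m - 1)
      else (pvInv pre (cell :: suf'), m - 1))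
      = (pvInv pre (cell :: suf') ++ List.replicate (L - m) blank, max m L - 1) := by
    split_ifs with hc
    · rw [pvGrow]
      have e1 : L - 1 - (m - 1) = L - m := by omega
      rw [e1, Prod.mk.injEq]
      exact ⟨rfl, by omega⟩
    · have e1 : L - m = 0 := by omega
      have e2 : max m L = m := by omega
      simp [e1, e2]
  rw [hgrown]
  simp only [hmc]
  rw [Prod.mk.injEq]
  refine ⟨?_, rfl⟩
  have hlenInv : ∀ suf : List String, (pvInv pre suf).length = m := by
    intro suf; simp [pvInv, ← hm]
  by_cases hL1 : L > 1
  · rw [if_pos hL1, pvFill]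
    apply List.ext_getElem
    · simp [pvInv, ← hm, hmc]
      omega
    · intro i hi1 hi2
      have him : i < max m L := by
        simpa [pvInv, ← hm, hmc] using hi2
      rw [List.getElem_mapIdx]
      have hrows1len : (pvInv pre (cell :: suf') ++ List.replicate (L - m) blank).length = max m L := by
        simp [hlenInv]; omega
      have hR : (pvInv (pre ++ [cell]) suf')[i]'hi2 = pvRowAt (pre ++ [cell]) suf' i := by
        simp [pvInv]
      rw [hR]
      by_cases him' : i < m
      · -- index inside the original rows
        have hL' : (pvInv pre (cell :: suf') ++ List.replicate (L - m) blank)[i]'(by simpa [hrows1len] using him)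
            = pvRowAt pre (cell :: suf') i := by
          rw [List.getElem_append_left (by simpa [hlenInv] using him')]
          simp [pvInv]
        rw [hL']
        by_cases hi0 : i = 0
        · subst hi0
          rw [if_pos (by omega : 0 < L), pvRowAt_zero, pvRowAt_zero]
          have hf : pvF cell = P.getD 0 "" := by
            simp only [pvF, ← hP, ← hL]
            rw [if_pos hL1]
          have hlen : pre.length = (pre.map pvF).length := by simp
          rw [hlen, pvSet_append]
          simp [hf]
        · by_cases hiL : i < L
          · rw [if_pos hiL, pvRowAt_pos _ _ hi0, pvRowAt_pos _ _ hi0]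
            have hg : pvG i cell = P.getD i "" := by
              simp only [pvG, ← hP, ← hL]
              rw [if_pos hiL]
            have hlen : pre.length = (pre.map (pvG i)).length := by simp
            rw [hlen, pvSet_append]
            simp [hg]
          · rw [if_neg hiL, pvRowAt_pos _ _ hi0, pvRowAt_pos _ _ hi0]
            have hg : pvG i cell = "" := by
              simp only [pvG, ← hP, ← hL]
              rw [if_neg hiL]
            simp [hg]
      · -- index in the freshly appended blank rows: m ≤ i < L
        have hiL : i < L := by omega
        have hi0 : i ≠ 0 := by omega
        have hL' : (pvInv pre (cell :: suf') ++ List.replicate (L - m) blank)[i]'(by simpa [hrows1len] using him)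
            = blank := by
          rw [List.getElem_append_right (by simp [hlenInv]; omega)]
          simp
        rw [hL', if_pos hiL, pvRowAt_pos _ _ hi0]
        have hblank' : blank = pre.map (fun _ : String => "") ++ "" :: suf'.map (fun _ : String => "") := by
          simp [hblank, h]
        rw [hblank']
        have hlen : pre.length = (pre.map (fun _ : String => "")).length := by simp
        rw [hlen, pvSet_append, List.map_append, pvMapG_of_ge (by omega : pvM pre ≤ i)]
        have hg : pvG i cell = P.getD i "" := by
          simp only [pvG, ← hP, ← hL]
          rw [if_pos hiL]
        simp [hg]
  · -- no multiline cell here: nothing appended, nothing written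
    rw [if_neg hL1]
    have e1 : L - m = 0 := by omega
    rw [e1]
    apply List.ext_getElem
    · simp [pvInv, hmc, ← hm]
      omega
    · intro i hi1 hi2
      simp only [List.replicate_zero, List.append_nil] at hi1 ⊢
      have hLmn : (pvInv pre (cell :: suf'))[i]'hi1 = pvRowAt pre (cell :: suf') i := by
        simp [pvInv]
      have hRmn : (pvInv (pre ++ [cell]) suf')[i]'hi2 = pvRowAt (pre ++ [cell]) suf' i := by
        simp [pvInv]
      rw [hLmn, hRmn]
      by_cases hi0 : i = 0
      · subst hi0
        rw [pvRowAt_zero, pvRowAt_zero]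
        have hf : pvF cell = cell := by
          simp only [pvF, ← hP, ← hL]
          rw [if_neg hL1]
        simp [hf]
      · rw [pvRowAt_pos _ _ hi0, pvRowAt_pos _ _ hi0]
        have hg : pvG i cell = "" := by
          simp only [pvG, ← hP, ← hL]
          rw [if_neg (by omega)]
        simp [hg]

lemma pvLoop_inv (suf : List String) : ∀ (pre row : List String), row = pre ++ suf →
    suf.foldl (pvStepA row) (pvInv pre suf, pvM pre - 1, pre.length)
      = (pvInv (pre ++ suf) [], pvM (pre ++ suf) - 1, pre.length + suf.length) := by
  induction suf with
  | nil => intro pre row h; simp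
  | cons c s ih =>
      intro pre row h
      rw [List.foldl_cons, pvStep_inv row pre s c h]
      have h' : row = (pre ++ [c]) ++ s := by simpa using h
      have := ih (pre ++ [c]) row h'
      simpa [List.append_assoc, Nat.add_assoc, Nat.add_comm, Nat.add_left_comm] using this

-- A's result, in closed form: the grid described by pvInv
lemma pvA_eq_inv (row : List String) : wrapSingleRow row = pvInv row [] := by
  unfold wrapSingleRow
  have h0 : (([row], 0, 0) : List (List String) × Nat × Nat)
      = (pvInv [] row, pvM [] - 1, ([] : List String).length) := by
    simp [pvInv, pvM, pvRowAt, List.range_succ]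
  rw [h0, pvLoop_inv row [] row (by simp)]
  simp

-- B's result, in closed form: the same index space, with pvG at every line
lemma pvAlt_eq (row : List String) :
    wrapSingleRow_alt row = (List.range (pvM row)).map (fun i => row.map (pvG i)) := by
  unfold wrapSingleRow_alt
  simp only [← pvSl_def]
  have h2 : ((row.map pvSl).map List.length).foldl max 0
      = row.foldl (fun x c => max x (pvSl c).length) 0 := by
    simp [List.foldl_map]
  have hM : max 1 (((row.map pvSl).map List.length).foldl max 0) = pvM row := by
    rw [h2]
    have h1 : (pvM row) = row.foldl (fun x c => max x (pvSl c).length) (max 1 0) := rfl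
    rw [h1, pvFoldMax_max]
  rw [hM]
  apply List.map_congr_left
  intro i _
  simp [List.map_map, Function.comp_def, pvG]

lemma pvF_eq_pvG0 {c : String}
    (h : ¬ ((pvSl c).length ≤ 1 ∧ (pvSl c).getD 0 "" ≠ c)) : pvF c = pvG 0 c := by
  simp only [pvF, pvG]
  by_cases hL : (pvSl c).length > 1
  · rw [if_pos hL, if_pos (by omega)]
  · rw [if_neg hL]
    push Not at h
    have hc := h (by omega)
    by_cases h0 : 0 < (pvSl c).length
    · rw [if_pos h0, hc]
    · rw [if_neg h0, ← hc]
      have : pvSl c = [] := List.eq_nil_of_length_eq_zero (by omega)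
      simp [this]

-- first line of each closed form
lemma pvHeads (row : List String) :
    ∃ tA tB, wrapSingleRow row = (row.map pvF) :: tA ∧
      wrapSingleRow_alt row = (row.map (pvG 0)) :: tB := by
  have hm := pvM_ge_one row
  obtain ⟨k, hk⟩ : ∃ k, pvM row = k + 1 := ⟨pvM row - 1, by omega⟩
  rw [pvA_eq_inv, pvAlt_eq]
  unfold pvInv
  rw [hk, List.range_eq_range', List.range'_succ, List.map_cons, List.map_cons, pvRowAt_zero]
  refine ⟨List.map (pvRowAt row []) (List.range' 1 k), _, ?_, rfl⟩
  simp

-- ===== VERDICT (by name: the statements are the Claim_ definitions above) =====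
theorem wrapSingleRow_spec : Claim_unchanged_wrapSingleRow := by
  intro row _ hD
  rw [pvA_eq_inv, pvAlt_eq]
  unfold pvInv
  apply List.map_congr_left
  intro i _
  by_cases hi : i = 0
  · subst hi
    rw [pvRowAt_zero, List.append_nil]
    apply List.map_congr_left
    intro c hc
    apply pvF_eq_pvG0
    intro hbad
    exact hD ⟨c, hc, hbad⟩
  · rw [pvRowAt_pos _ _ hi]
    simp

theorem wrapSingleRow_changed : Claim_changed_wrapSingleRow := by
  unfold Claim_changed_wrapSingleRow; decide

theorem wrapSingleRow_tight : Claim_exact_wrapSingleRow := by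
  intro row _ hD heq
  obtain ⟨c, hc, hle, hne⟩ := hD
  rw [← pvSl_def] at hle hne
  obtain ⟨tA, tB, hA, hB⟩ := pvHeads row
  rw [hA, hB] at heq
  have hmaps : row.map pvF = row.map (pvG 0) := (List.cons.injEq _ _ _ _ ▸ heq).1
  have := (List.map_eq_map_iff.mp hmaps) c hc
  simp only [pvF, pvG] at this
  rw [if_neg (by omega)] at this
  by_cases h0 : 0 < (pvSl c).length
  · rw [if_pos h0] at this
    exact hne this.symm
  · rw [if_neg h0] at this
    have hnil : pvSl c = [] := List.eq_nil_of_length_eq_zero (by omega)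
    exact hne (by rw [hnil]; simp [this])
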